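-- pv_equiv track=rewrite | github.com/EpistasisLab/SAFE | maze/robot.py | look_right
-- ===== SOURCE A (Python) =====
-- def maze_size(maze):
--     return len(maze), len(maze[0]) # height, width
--
-- def look_right(maze, pos):# look right and return: distance to obstacle/wall, goal found?
--     height, width = maze_size(maze)
--     y,x = pos
--     goal_right = 0
--     dist = 0
--     hit_obs = False
--     x += 1
--     while x<width:
--         if maze[y][x]==3: goal_right = width
--         if not hit_obs and maze[y][x]==1:
--             dist += 1
--             hit_obs = True
--         elif not hit_obs:
--             dist += 1
--         x += 1
--     return dist, goal_right
-- ===== SOURCE B (Python) =====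
-- def look_right(maze, pos):
--     width = len(maze[0])
--     y, x = pos
--     cells = [maze[y][i] for i in range(x + 1, width)]
--     goal_right = width if 3 in cells else 0
--     dist = 0
--     for c in cells:
--         dist += 1
--         if c == 1:
--             break
--     return dist, goal_right
-- ===== Notes on version B (the rewrite author's own statement) =====
-- stated objective: simpler
-- what changed: Replaces the single stateful while-loop with hit_obs flag by materialising the cells to the right once, then a membership test for the goal and a separate early-break counting loop for the obstacle distance.
import Mathlib
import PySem

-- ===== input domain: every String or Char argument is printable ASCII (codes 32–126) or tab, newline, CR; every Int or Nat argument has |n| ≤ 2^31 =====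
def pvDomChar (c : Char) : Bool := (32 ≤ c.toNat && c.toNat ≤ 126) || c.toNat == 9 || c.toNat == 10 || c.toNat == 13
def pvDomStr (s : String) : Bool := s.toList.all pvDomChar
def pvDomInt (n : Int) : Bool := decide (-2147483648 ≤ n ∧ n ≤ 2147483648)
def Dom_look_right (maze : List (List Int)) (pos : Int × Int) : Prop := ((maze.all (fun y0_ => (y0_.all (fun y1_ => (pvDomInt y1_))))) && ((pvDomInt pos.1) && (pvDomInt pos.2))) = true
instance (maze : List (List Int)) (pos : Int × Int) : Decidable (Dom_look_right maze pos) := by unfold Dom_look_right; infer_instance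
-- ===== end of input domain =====

-- B replaces A's single stateful while-loop (hit_obs flag) by: collect the cells to the
-- right once, test membership of 3 for the goal, and count with an early-break loop — simpler decomposition, same cost.


-- ===== PORT A =====
-- loop body of A's while-loop: state (goal_right, dist, hit_obs), current cell c
def lookRightStep (width : Int) (s : Int × Int × Bool) (c : Int) : Int × Int × Bool :=
  let g := if c == 3 then width else s.1
  if !s.2.2 && c == 1 then (g, s.2.1 + 1, true)
  else if !s.2.2 then (g, s.2.1 + 1, s.2.2)
  else (g, s.2.1, s.2.2)

def look_right (maze : List (List Int)) (pos : Int × Int) : Int × Int :=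
  let width : Int := ((maze.headD []).length : Int)
  let y := pos.1
  let x := pos.2
  let row := (PySem.List.pyGet? maze y).getD []
  let s := (PySem.List.pyRange (x + 1) width 1).foldl
    (fun s i => lookRightStep width s ((PySem.List.pyGet? row i).getD 0)) (0, 0, false)
  (s.2.1, s.1)

-- ===== PORT B =====
-- the early-break counting loop of B
def lookRightDist : List Int → Int → Int
  | [], d => d
  | c :: cs, d => if c == 1 then d + 1 else lookRightDist cs (d + 1)

def look_right_alt (maze : List (List Int)) (pos : Int × Int) : Int × Int :=
  let width : Int := ((maze.headD []).length : Int)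
  let y := pos.1
  let x := pos.2
  let cells := (PySem.List.pyRange (x + 1) width 1).map
    (fun i => (PySem.List.pyGet? ((PySem.List.pyGet? maze y).getD []) i).getD 0)
  let goal_right : Int := if (3 : Int) ∈ cells then width else 0
  (lookRightDist cells 0, goal_right)

-- ===== PRECONDITION & SPEC =====
-- Pre_ is exactly the set where Python A returns (no IndexError): maze nonempty, and when the
-- loop runs (x+1 < width), the row index y and every column index in [x+1, width) are in range.
def Pre_look_right (maze : List (List Int)) (pos : Int × Int) : Prop :=
  maze ≠ [] ∧
  (pos.2 + 1 < ((maze.headD []).length : Int) →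
    (-(maze.length : Int) ≤ pos.1 ∧ pos.1 < (maze.length : Int) ∧
     -(((PySem.List.pyGet? maze pos.1).getD []).length : Int) ≤ pos.2 + 1 ∧
     ((maze.headD []).length : Int) ≤ (((PySem.List.pyGet? maze pos.1).getD []).length : Int)))
instance (maze : List (List Int)) (pos : Int × Int) : Decidable (Pre_look_right maze pos) := by
  unfold Pre_look_right; infer_instance

def pvWitness_look_right : List (List Int) × (Int × Int) := ([[0, 1, 3]], (0, 0))

def Spec_look_right (maze : List (List Int)) (pos : Int × Int) (out : Int × Int) : Prop := out = look_right_alt maze pos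
instance (maze : List (List Int)) (pos : Int × Int) (out : Int × Int) : Decidable (Spec_look_right maze pos out) := by unfold Spec_look_right; infer_instance

-- ===== CLAIM (what is proved, stated in full; the proofs are below) =====
def Claim_equal_look_right : Prop := ∀ (maze : List (List Int)) (pos : Int × Int), Dom_look_right maze pos → Pre_look_right maze pos → Spec_look_right maze pos (look_right maze pos)

-- ===== LEMMAS AND PROOFS =====

-- characterisation of A's fold over an arbitrary cell list, generalised over the initial state
theorem foldl_lookRightStep (width : Int) :
    ∀ (cells : List Int) (g d : Int) (h : Bool),
      cells.foldl (lookRightStep width) (g, d, h)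
        = (if (3 : Int) ∈ cells then width else g,
           (if h then d else lookRightDist cells d),
           h || cells.any (· == 1)) := by
  intro cells
  induction cells with
  | nil => intro g d h; simp [lookRightDist]
  | cons c cs ih =>
    intro g d h
    simp only [List.foldl_cons, lookRightStep]
    by_cases h3 : c = 3
    · subst h3
      cases h with
      | false => simp [ih, lookRightDist]
      | true => simp [ih]
    · cases h with
      | false =>
        by_cases h1 : c = 1
        · subst h1; simp [ih, lookRightDist]
        · simp [ih, lookRightDist, h3, h1, Ne.symm h3]
      | true => simp [ih, h3, Ne.symm h3]

-- ===== VERDICT (by name: the statement is the Claim_ definition above) =====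
theorem look_right_spec : Claim_equal_look_right := by
  intro maze pos _ _
  unfold Spec_look_right look_right look_right_alt
  simp only [← List.foldl_map, foldl_lookRightStep]
  simp
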